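-- pv_equiv track=rewrite | github.com/HummadKhan1/HummadKhan1 | 2369-maximum-sum-score-of-array/maximum-sum-score-of-array.py | maximumSumScore
-- ===== SOURCE A (Python) =====
-- from typing import List
--
-- def maximumSumScore(nums: List[int]) -> int:
--     '''
--     parameters: int arr nums.
--     return: max sum score.
--     Really asking: max_sum = max(max_sum, max(maxLeft, maxRight))
--     constraints:
--     '''
--     maxLeft = []
--     total = 0
--     for n in nums:
--         total += n
--         maxLeft.append(total)
--
--     maxRight=[0]*len(nums)
--     total = 0
--     for i in range(len(nums)-1,-1,-1):
--         total += nums[i]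
--         maxRight[i] = total
--
--     max_sum = nums[0]
--     for i in range(len(nums)):
--         max_sum = max(max_sum, max(maxLeft[i], maxRight[i]))
--     return max_sum
-- ===== SOURCE B (Python) =====
-- from typing import List
--
-- def maximumSumScore(nums: List[int]) -> int:
--     # max suffix sum = total - min prefix sum over proper prefixes (duality),
--     # so one pass tracks only the running prefix sum, its min and its max.
--     total = sum(nums)
--     hi = nums[0]          # raises IndexError on [] just like A
--     lo = 0                # min of prefix sums P_0..P_{n-1}
--     p = 0
--     for n in nums:
--         if p < lo:
--             lo = p
--         p += n
--         if p > hi: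
--             hi = p
--     return max(hi, total - lo)
-- ===== Notes on version B (the rewrite author's own statement) =====
-- stated objective: faster
-- what changed: B uses the duality max-suffix-sum = total - min-prefix-sum: one pass tracks only the running prefix sum, its minimum and maximum, combining once at the end, so no suffix sums and no per-index max(left,right) comparison exist (A builds prefix and suffix arrays and scans them a third time).
import Mathlib
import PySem

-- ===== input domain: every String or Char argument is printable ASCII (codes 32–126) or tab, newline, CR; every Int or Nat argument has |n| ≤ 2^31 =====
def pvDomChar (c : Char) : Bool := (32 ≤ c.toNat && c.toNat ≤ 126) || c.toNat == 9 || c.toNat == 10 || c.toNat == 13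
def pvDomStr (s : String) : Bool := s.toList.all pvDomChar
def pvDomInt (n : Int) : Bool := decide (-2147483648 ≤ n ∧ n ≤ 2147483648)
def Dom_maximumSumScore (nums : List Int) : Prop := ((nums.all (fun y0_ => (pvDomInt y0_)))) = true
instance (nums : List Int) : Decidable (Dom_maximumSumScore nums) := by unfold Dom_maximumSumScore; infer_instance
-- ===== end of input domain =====

-- B replaces A's prefix/suffix arrays and per-index max(left,right) scan by the duality
-- max-suffix-sum = total - min-prefix-sum: one pass over scalars, combined once at the end.

-- ===== PORT A =====
-- Literal port of A. All list indices (nums[i], maxLeft[i], maxRight[i], the assignment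
-- maxRight[i] = total) are always in range for the loops' index sets, so the total forms
-- pyGetD / pySetD are exact; the initial read of the first element raises IndexError on the empty list — excluded by Pre_.
def maximumSumScore (nums : List Int) : Int :=
  -- maxLeft = []; total = 0; for n in nums: total += n; maxLeft.append(total)
  let st1 := nums.foldl (fun (st : List Int × Int) n => (st.1 ++ [st.2 + n], st.2 + n)) ([], 0)
  let maxLeft := st1.1
  -- maxRight = [0]*len(nums); total = 0; for i in range(len(nums)-1,-1,-1): ...
  let st2 := (PySem.List.pyRange ((PySem.List.len nums) - 1) (-1) (-1)).foldl
    (fun (st : List Int × Int) i =>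
      let t := st.2 + PySem.List.pyGetD nums i 0
      (PySem.List.pySetD st.1 i t, t))
    (List.replicate nums.length (0 : Int), 0)
  let maxRight := st2.1
  -- max_sum = nums[0]; for i in range(len(nums)): max_sum = max(max_sum, max(maxLeft[i], maxRight[i]))
  let max0 := (PySem.List.pyGet? nums 0).getD 0
  (PySem.List.pyRange 0 (PySem.List.len nums) 1).foldl
    (fun m i => max m (max (PySem.List.pyGetD maxLeft i 0) (PySem.List.pyGetD maxRight i 0))) max0

-- ===== PORT B =====
-- total = sum(nums); hi = nums[0]; lo = 0; p = 0;
-- for n in nums: if p < lo: lo = p; p += n; if p > hi: hi = p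
-- return max(hi, total - lo)
/-- B's loop body: update the running min (before the add), the prefix sum, and the max. -/
def stepB (st : Int × Int × Int) (n : Int) : Int × Int × Int :=
  let lo := if st.1 < st.2.1 then st.1 else st.2.1
  let p := st.1 + n
  let hi := if p > st.2.2 then p else st.2.2
  (p, lo, hi)

def maximumSumScore_alt (nums : List Int) : Int :=
  let total := nums.sum
  let hi0 := (PySem.List.pyGet? nums 0).getD 0
  let st := nums.foldl stepB ((0 : Int), (0 : Int), hi0)
  max st.2.2 (total - st.2.1)

-- ===== PRECONDITION & SPEC =====
-- Pre_ excludes only the empty list, on which both Pythons raise IndexError reading the first element.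
def Pre_maximumSumScore (nums : List Int) : Prop := nums ≠ []
instance (nums : List Int) : Decidable (Pre_maximumSumScore nums) := by
  unfold Pre_maximumSumScore; infer_instance
def pvWitness_maximumSumScore : List Int := [3, -1, 2]
def Spec_maximumSumScore (nums : List Int) (out : Int) : Prop := out = maximumSumScore_alt nums
instance (nums : List Int) (out : Int) : Decidable (Spec_maximumSumScore nums out) := by
  unfold Spec_maximumSumScore; infer_instance

-- ===== CLAIM (what is proved, stated in full; the proofs are below) =====
def Claim_equal_maximumSumScore : Prop := ∀ (nums : List Int), Dom_maximumSumScore nums → Pre_maximumSumScore nums → Spec_maximumSumScore nums (maximumSumScore nums)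

-- ===== LEMMAS AND PROOFS =====

/-- Prefix-sum list starting from accumulator `t`. -/
def scanPre (t : Int) : List Int → List Int
  | [] => []
  | x :: xs => (t + x) :: scanPre (t + x) xs

/-- Suffix-sum list shifted by `s`: element at `i` is `s + (xs.drop i).sum`. -/
def sufs (xs : List Int) (s : Int) : List Int :=
  match xs with
  | [] => []
  | x :: xs => (x + xs.sum + s) :: sufs xs s

theorem length_scanPre (xs : List Int) : ∀ t, (scanPre t xs).length = xs.length := by
  induction xs with
  | nil => intro t; rfl
  | cons x xs ih => intro t; simp [scanPre, ih]

theorem length_sufs (xs : List Int) (s : Int) : (sufs xs s).length = xs.length := by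
  induction xs with
  | nil => rfl
  | cons x xs ih => simp [sufs, ih]

theorem sufs_append_singleton (ys : List Int) (x s : Int) :
    sufs (ys ++ [x]) s = sufs ys (x + s) ++ [x + s] := by
  induction ys with
  | nil => simp [sufs]
  | cons y ys ih => simp [sufs, ih]; ring

theorem foldlA_left (xs : List Int) : ∀ (l : List Int) (t : Int),
    xs.foldl (fun (st : List Int × Int) n => (st.1 ++ [st.2 + n], st.2 + n)) (l, t)
      = (l ++ scanPre t xs, t + xs.sum) := by
  induction xs with
  | nil => intro l t; simp [scanPre]
  | cons x xs ih => intro l t; simp [List.foldl, scanPre, ih]; ring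

/-- Characterization of A's backward loop over `range(len-1, -1, -1)`. -/
theorem foldlA_right (pref : List Int) : ∀ (nums r : List Int) (s : Int),
    nums.take pref.length = pref →
    (PySem.List.pyRange ((pref.length : Int) - 1) (-1) (-1)).foldl
      (fun (st : List Int × Int) i =>
        let t := st.2 + PySem.List.pyGetD nums i 0
        (PySem.List.pySetD st.1 i t, t))
      (List.replicate pref.length (0 : Int) ++ r, s)
      = (sufs pref s ++ r, s + pref.sum) := by
  induction pref using List.reverseRecOn with
  | nil =>
    intro nums r s _
    rw [PySem.List.pyRange_neg_one_eq_nil (by norm_num)]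
    simp [sufs]
  | append_singleton ys x ih =>
    intro nums r s htake
    have hlen : ((ys ++ [x]).length : Int) - 1 = (ys.length : Int) := by simp
    rw [hlen, PySem.List.pyRange_neg_one_cons (by omega)]
    have hx : PySem.List.pyGetD nums (ys.length : Int) 0 = x := by
      have h1 : nums[ys.length]? = some x := by
        have h2 : (nums.take (ys.length + 1))[ys.length]? = nums[ys.length]? := by
          rw [List.getElem?_take_of_lt (by omega)]
        rw [← h2]
        have h3 : nums.take (ys.length + 1) = ys ++ [x] := by simpa using htake
        rw [h3]
        simp
      simp [List.getD_eq_getElem?_getD, h1]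
    have hset : ∀ (t : Int), (List.replicate (ys.length + 1) (0 : Int) ++ r).set ys.length t
        = List.replicate ys.length (0 : Int) ++ (t :: r) := by
      intro t
      induction ys.length with
      | zero => simp [List.replicate]
      | succ k ihk => simp [List.replicate_succ] at ihk ⊢; exact ihk
    have htake' : nums.take ys.length = ys := by
      have : (nums.take (ys.length + 1)).take ys.length = ys := by
        have h3 : nums.take (ys.length + 1) = ys ++ [x] := by simpa using htake
        rw [h3, List.take_left]
      simpa [List.take_take] using this
    simp only [List.foldl_cons, List.length_append, List.length_singleton, List.replicate_succ']
    rw [show List.replicate ys.length (0:Int) ++ [(0:Int)] ++ r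
        = List.replicate (ys.length + 1) (0:Int) ++ r by simp [List.replicate_succ']]
    simp only [PySem.List.pySetD_natCast, hx, hset]
    rw [ih nums ((s + x) :: r) (s + x) htake']
    rw [sufs_append_singleton, Prod.ext_iff]
    refine ⟨by simp [add_comm x s], by simp; ring⟩

theorem foldlA_right' (nums : List Int) :
    (PySem.List.pyRange ((nums.length : Int) - 1) (-1) (-1)).foldl
      (fun (st : List Int × Int) i =>
        let t := st.2 + PySem.List.pyGetD nums i 0
        (PySem.List.pySetD st.1 i t, t))
      (List.replicate nums.length (0 : Int), 0)
      = (sufs nums 0, nums.sum) := by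
  have h := foldlA_right nums nums [] 0 (by simp)
  simpa using h

/-- A's last loop over two equal-length lists read by index equals a fold over their zip. -/
theorem foldlA_final (u v : List Int) (n : Int) (m0 : Int)
    (hu : (u.length : Int) = n) (hv : (v.length : Int) = n) :
    (PySem.List.pyRange 0 n 1).foldl
      (fun m i => max m (max (PySem.List.pyGetD u i 0) (PySem.List.pyGetD v i 0))) m0
      = (u.zip v).foldl (fun m p => max m (max p.1 p.2)) m0 := by
  have hzlen : ((u.zip v).length : Int) = n := by simp [List.length_zip]; omega
  have hcongr : (PySem.List.pyRange 0 n 1).foldl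
      (fun m i => max m (max (PySem.List.pyGetD u i 0) (PySem.List.pyGetD v i 0))) m0
      = (PySem.List.pyRange 0 n 1).foldl
      (fun m i => max m (max (PySem.List.pyGetD (u.zip v) i (0, 0)).1
                             (PySem.List.pyGetD (u.zip v) i (0, 0)).2)) m0 := by
    apply PySem.List.foldl_congr_mem
    intro acc i hi
    rw [PySem.List.mem_pyRange_one] at hi
    have h1 : PySem.List.pyGetD u i 0 = u[i.toNat] :=
      PySem.List.pyGetD_eq_getElem u 0 hi.1 (by rw [hu]; exact hi.2)
    have h2 : PySem.List.pyGetD v i 0 = v[i.toNat] :=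
      PySem.List.pyGetD_eq_getElem v 0 hi.1 (by rw [hv]; exact hi.2)
    have h3 : PySem.List.pyGetD (u.zip v) i (0, 0) = (u.zip v)[i.toNat] :=
      PySem.List.pyGetD_eq_getElem (u.zip v) (0, 0) hi.1 (by rw [hzlen]; exact hi.2)
    rw [h1, h2, h3, List.getElem_zip]
  rw [hcongr, ← hzlen]
  exact PySem.List.foldl_pyRange_zero_pyGetD' (u.zip v) (0, 0) (fun m p => max m (max p.1 p.2)) m0

/-- Invariant: the zipped A-fold with accumulator `max hi (total - lo)` equals B's deferred
combination `max hiF (total - loF)`, given `total = t + s + xs.sum`. -/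
theorem key (xs : List Int) : ∀ (t s lo hi total : Int), total = t + s + xs.sum →
    ((scanPre t xs).zip (sufs xs s)).foldl (fun m p => max m (max p.1 p.2))
        (max hi (total - lo))
      = (let st := xs.foldl stepB (t, lo, hi); max st.2.2 (total - st.2.1)) := by
  induction xs with
  | nil => intro t s lo hi total h; simp [scanPre, sufs, List.foldl]
  | cons x xs ih =>
    intro t s lo hi total h
    simp only [scanPre, sufs, List.zip_cons_cons, List.foldl_cons, stepB]
    have harg : max (max hi (total - lo)) (max (t + x) (x + xs.sum + s))
        = max (if t + x > hi then t + x else hi)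
            (total - (if t < lo then t else lo)) := by
      simp only [List.sum_cons] at h
      split_ifs <;> omega
    rw [harg, ih (t + x) s (if t < lo then t else lo) (if t + x > hi then t + x else hi)
          total (by simp only [List.sum_cons] at h ⊢; omega)]

-- ===== VERDICT (by name: the statement is the Claim_ definition above) =====
theorem maximumSumScore_spec : Claim_equal_maximumSumScore := by
  intro nums _ hpre
  unfold Spec_maximumSumScore maximumSumScore maximumSumScore_alt
  simp only [PySem.List.len_eq, foldlA_left, List.nil_append, foldlA_right']
  rw [foldlA_final (scanPre 0 nums) (sufs nums 0) (nums.length : Int) _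
        (by simp [length_scanPre]) (by simp [length_sufs])]
  obtain ⟨x, rest, rfl⟩ := List.exists_cons_of_ne_nil hpre
  have hget : ((PySem.List.pyGet? (x :: rest) 0).getD 0) = x := by
    simp [PySem.List.pyGet?, PySem.List.pyIdx?]
  simp only [hget, scanPre, sufs, List.zip_cons_cons, List.foldl_cons, stepB]
  have hif1 : (if (0:Int) < 0 then (0:Int) else 0) = 0 := by norm_num
  have hif2 : (if (0:Int) + x > x then (0:Int) + x else x) = x := by
    split_ifs <;> omega
  rw [hif1, hif2]
  have hk := key rest (0 + x) 0 0 x ((x :: rest).sum) (by simp)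
  rw [show max x (max (0 + x) (x + rest.sum + 0)) = max x ((x :: rest).sum - 0) by
        simp only [List.sum_cons]; omega]
  rw [hk]
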